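-- pv_equiv track=rewrite | github.com/vismit2000/compCode-II | Advent-of-Code/2024/day22.py | price_timeline
-- ===== SOURCE A (Python) =====
-- from collections import defaultdict, deque
--
-- def nth_secret(secret: int, n=2000) -> int:
--     for _ in range(n):
--         secret ^= (secret * 64) % 16777216
--         secret ^= (secret // 32) % 16777216
--         secret ^= (secret * 2048) % 16777216
--     return secret
--
-- def price_timeline(secret, n=2000):
--     """Each {delta-4-tuple: price} in the timeline of this secret number for `n` steps."""
--     timeline = {}
--     deltas = deque(maxlen=4)
--     price = secret % 10  # Initial price
--     for _ in range(n):
--         secret = nth_secret(secret, 1)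
--         price, previous_price = secret % 10, price
--         deltas.append(price - previous_price)
--         D = tuple(deltas)
--         if len(D) == 4 and D not in timeline:
--             timeline[D] = price
--     return timeline
-- ===== SOURCE B (Python) =====
-- def price_timeline(secret, n=2000):
--     """Each {delta-4-tuple: price} in the timeline of this secret number for `n` steps."""
--     # Phase 1: precompute all prices[0..n] by evolving the secret inline.
--     prices = [secret % 10]
--     s = secret
--     for _ in range(n):
--         s ^= (s * 64) % 16777216
--         s ^= (s // 32) % 16777216
--         s ^= (s * 2048) % 16777216
--         prices.append(s % 10)
--     # Phase 2: consecutive differences.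
--     deltas = [b - a for a, b in zip(prices, prices[1:])]
--     # Phase 3: windowing pass over delta indices; first occurrence wins.
--     timeline = {}
--     for i in range(3, len(deltas)):
--         timeline.setdefault(tuple(deltas[i - 3:i + 1]), prices[i + 1])
--     return timeline
-- ===== Notes on version B (the rewrite author's own statement) =====
-- stated objective: alternative
-- what changed: Replaces A's single online loop with a deque sliding window and per-step nth_secret calls by three separate passes: precompute the full prices list with the xor/mod steps inlined, derive the deltas list as consecutive differences, then an index-based windowing pass recording each 4-delta slice with setdefault (first occurrence wins).
import Mathlib
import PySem

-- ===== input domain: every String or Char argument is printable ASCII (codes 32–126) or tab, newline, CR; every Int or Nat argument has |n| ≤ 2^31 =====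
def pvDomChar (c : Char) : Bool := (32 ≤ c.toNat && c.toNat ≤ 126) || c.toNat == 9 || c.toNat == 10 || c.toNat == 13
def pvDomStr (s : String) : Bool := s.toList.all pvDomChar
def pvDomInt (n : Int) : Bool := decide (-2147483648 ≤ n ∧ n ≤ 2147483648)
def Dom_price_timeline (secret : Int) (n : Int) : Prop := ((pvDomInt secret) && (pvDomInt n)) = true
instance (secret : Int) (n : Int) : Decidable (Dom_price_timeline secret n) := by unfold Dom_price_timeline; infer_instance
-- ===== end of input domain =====

-- B replaces A's online deque sliding window by three separate passes (precompute prices, take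
-- consecutive differences, then an index-based windowing pass with setdefault); alternative decomposition.

-- ===== PORT A =====
-- one xor/mod evolution step of the secret (shared arithmetic of both programs)
def pvStep (s : Int) : Int :=
  let s1 := PySem.Int.bxor s (PySem.Int.mod (s * 64) 16777216)
  let s2 := PySem.Int.bxor s1 (PySem.Int.mod (PySem.Int.floordiv s1 32) 16777216)
  PySem.Int.bxor s2 (PySem.Int.mod (s2 * 2048) 16777216)

-- port of A's helper nth_secret
def nth_secret (secret : Int) (n : Int) : Int :=
  (List.range n.toNat).foldl (fun s _ => pvStep s) secret

-- A's loop body: state = (secret, price, deltas deque (maxlen 4), timeline assoc list)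
def pvBodyA (st : Int × Int × List Int × List (List Int × Int)) (_ : Nat) :
    Int × Int × List Int × List (List Int × Int) :=
  let s' := nth_secret st.1 1
  let price := PySem.Int.mod s' 10
  let dq0 := st.2.2.1 ++ [price - st.2.1]
  let dq := dq0.drop (dq0.length - 4)      -- deque(maxlen=4): drop from the left when full
  let tl := st.2.2.2
  let tl := if dq.length = 4 ∧ tl.lookup dq = none then tl ++ [(dq, price)] else tl
  (s', price, dq, tl)

def price_timeline (secret : Int) (n : Int) : List (List Int × Int) :=
  ((List.range n.toNat).foldl pvBodyA (secret, PySem.Int.mod secret 10, [], [])).2.2.2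

-- ===== PORT B =====
-- B phase 1 body: state = (prices so far, current secret)
def pvBodyB1 (st : List Int × Int) (_ : Nat) : List Int × Int :=
  let s' := pvStep st.2
  (st.1 ++ [PySem.Int.mod s' 10], s')

-- B phase 3 body: one setdefault of the window ending at delta index i
def pvSetdef (prices deltas : List Int) (tl : List (List Int × Int)) (i : Int) :
    List (List Int × Int) :=
  let w := PySem.List.slice deltas (some (i - 3)) (some (i + 1))
  let p := PySem.List.pyGetD prices (i + 1) 0   -- index i+1 is always in range here
  if tl.lookup w = none then tl ++ [(w, p)] else tl

def price_timeline_alt (secret : Int) (n : Int) : List (List Int × Int) :=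
  let prices := ((List.range n.toNat).foldl pvBodyB1 ([PySem.Int.mod secret 10], secret)).1
  let deltas := List.zipWith (fun a b => b - a) prices (prices.drop 1)
  (PySem.List.pyRange 3 (PySem.List.len deltas) 1).foldl (pvSetdef prices deltas) []

-- ===== PRECONDITION & SPEC =====
def Spec_price_timeline (secret : Int) (n : Int) (out : List (List Int × Int)) : Prop := out = price_timeline_alt secret n
instance (secret : Int) (n : Int) (out : List (List Int × Int)) : Decidable (Spec_price_timeline secret n out) := by unfold Spec_price_timeline; infer_instance

-- ===== CLAIM (what is proved, stated in full; the proofs are below) =====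
def Claim_equal_price_timeline : Prop := ∀ (secret : Int) (n : Int), Dom_price_timeline secret n → Spec_price_timeline secret n (price_timeline secret n)

-- ===== LEMMAS AND PROOFS =====

-- price after k evolutions
def pvP (secret : Int) (k : Nat) : Int := PySem.Int.mod (pvStep^[k] secret) 10
-- k-th delta
def pvD (secret : Int) (k : Nat) : Int := pvP secret (k + 1) - pvP secret k
-- window of four deltas ending at j
def pvW (secret : Int) (j : Nat) : List Int :=
  [pvD secret (j - 3), pvD secret (j - 2), pvD secret (j - 1), pvD secret j]
-- deque content after k iterations of A
def pvDeq (secret : Int) (k : Nat) : List Int := ((List.range k).map (pvD secret)).drop (k - 4)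
-- reference timeline after processing windows ending at indices < m
def pvRef (secret : Int) (m : Nat) : List (List Int × Int) :=
  (List.range m).foldl
    (fun tl j => if 3 ≤ j then
        (if tl.lookup (pvW secret j) = none then tl ++ [(pvW secret j, pvP secret (j + 1))] else tl)
      else tl) []

lemma take_four_drop_map_range (f : Nat → Int) (t k : Nat) (h : t + 4 ≤ k) :
    (((List.range k).map f).drop t).take 4 = [f t, f (t+1), f (t+2), f (t+3)] := by
  apply List.ext_getElem
  · simp; omega
  · intro i h1 h2
    simp only [List.getElem_take, List.getElem_drop, List.getElem_map, List.getElem_range]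
    have hi4 : i < 4 := by simpa using h2
    interval_cases i <;> simp

lemma deq_len (secret : Int) (k : Nat) : (pvDeq secret k).length = min k 4 := by
  simp [pvDeq]; omega

lemma deq_succ (secret : Int) (k : Nat) :
    ((pvDeq secret k ++ [pvD secret k]).drop ((pvDeq secret k ++ [pvD secret k]).length - 4))
      = pvDeq secret (k + 1) := by
  have hl := deq_len secret k
  simp only [List.length_append, List.length_cons, List.length_nil, hl]
  unfold pvDeq
  rw [List.range_succ, List.map_append]
  simp only [List.map_cons, List.map_nil]
  rw [← List.drop_append_of_le_length (by simp)]
  rw [List.drop_drop]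
  congr 1
  omega

lemma deq_succ_window (secret : Int) (k : Nat) (hk : 3 ≤ k) :
    pvDeq secret (k + 1) = pvW secret k := by
  unfold pvDeq
  rw [show k + 1 - 4 = k - 3 by omega]
  have h := take_four_drop_map_range (pvD secret) (k - 3) (k + 1) (by omega)
  have hlen2 : (((List.range (k + 1)).map (pvD secret)).drop (k - 3)).length ≤ 4 := by
    simp; omega
  rw [← List.take_of_length_le hlen2, h]
  unfold pvW
  simp only [show k - 3 + 1 = k - 2 by omega, show k - 3 + 2 = k - 1 by omega,
    show k - 3 + 3 = k by omega]

lemma aloop (secret : Int) (k : Nat) :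
    (List.range k).foldl pvBodyA (secret, PySem.Int.mod secret 10, [], [])
      = (pvStep^[k] secret, pvP secret k, pvDeq secret k, pvRef secret k) := by
  induction k with
  | zero => simp [pvP, pvDeq, pvRef]
  | succ k ih =>
    rw [List.range_succ, List.foldl_append, ih]
    simp only [List.foldl_cons, List.foldl_nil]
    show pvBodyA _ k = _
    unfold pvBodyA
    have hs : nth_secret (pvStep^[k] secret) 1 = pvStep^[k+1] secret := by
      simp [nth_secret, Function.iterate_succ_apply']
    simp only [hs]
    have hprice : PySem.Int.mod (pvStep^[k+1] secret) 10 = pvP secret (k+1) := rfl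
    have hd : pvP secret (k+1) - pvP secret k = pvD secret k := rfl
    simp only [hprice, hd]
    rw [deq_succ]
    have href : pvRef secret (k+1)
        = if 3 ≤ k then
            (if (pvRef secret k).lookup (pvW secret k) = none
              then pvRef secret k ++ [(pvW secret k, pvP secret (k+1))] else pvRef secret k)
          else pvRef secret k := by
      unfold pvRef; rw [List.range_succ, List.foldl_append]; simp
    by_cases hk : 3 ≤ k
    · rw [deq_succ_window secret k hk]
      have hlen : (pvW secret k).length = 4 := rfl
      simp only [href, if_pos hk, hlen]
      simp only [true_and]
    · have hlt : (pvDeq secret (k+1)).length ≠ 4 := by rw [deq_len]; omega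
      simp only [href, if_neg hk]
      rw [if_neg (by tauto)]

lemma bloop1 (secret : Int) (k : Nat) :
    (List.range k).foldl pvBodyB1 ([PySem.Int.mod secret 10], secret)
      = ((List.range (k + 1)).map (pvP secret), pvStep^[k] secret) := by
  induction k with
  | zero => simp [pvP]
  | succ k ih =>
    rw [List.range_succ, List.foldl_append, ih]
    simp only [List.foldl_cons, List.foldl_nil]
    show pvBodyB1 _ k = _
    unfold pvBodyB1
    simp only [← Function.iterate_succ_apply']
    rw [List.range_succ (n := k + 1), List.map_append]
    rfl

lemma deltas_eq (secret : Int) (k : Nat) :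
    List.zipWith (fun a b => b - a) ((List.range (k+1)).map (pvP secret))
        (((List.range (k+1)).map (pvP secret)).drop 1)
      = (List.range k).map (pvD secret) := by
  apply List.ext_getElem
  · simp
  · intro i h1 h2
    simp only [List.getElem_zipWith, List.getElem_drop, List.getElem_map, List.getElem_range]
    simp [pvD, Nat.add_comm]

lemma pvRef_le_three (secret : Int) (m : Nat) (hm : m ≤ 3) : pvRef secret m = [] := by
  interval_cases m <;> rfl

lemma bloop2 (secret : Int) (k : Nat) (m : Nat) (hm : m ≤ k) :
    (PySem.List.pyRange 3 (m : Int) 1).foldl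
        (pvSetdef ((List.range (k+1)).map (pvP secret)) ((List.range k).map (pvD secret))) []
      = pvRef secret m := by
  induction m with
  | zero =>
    rw [PySem.List.pyRange_one_eq_nil (by norm_num)]
    simp [pvRef]
  | succ m ih =>
    have href : pvRef secret (m+1)
        = if 3 ≤ m then
            (if (pvRef secret m).lookup (pvW secret m) = none
              then pvRef secret m ++ [(pvW secret m, pvP secret (m+1))] else pvRef secret m)
          else pvRef secret m := by
      unfold pvRef; rw [List.range_succ, List.foldl_append]; simp
    by_cases h3 : 3 ≤ m
    · rw [show ((m + 1 : Nat) : Int) = (m : Int) + 1 by push_cast; ring]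
      rw [PySem.List.pyRange_one_succ_right (by exact_mod_cast h3)]
      rw [List.foldl_append, ih (by omega)]
      simp only [List.foldl_cons, List.foldl_nil]
      rw [href, if_pos h3]
      unfold pvSetdef
      have hw : PySem.List.slice ((List.range k).map (pvD secret))
          (some ((m : Int) - 3)) (some ((m : Int) + 1)) = pvW secret m := by
        rw [show ((m : Int) - 3) = ((m - 3 : Nat) : Int) by omega,
            show ((m : Int) + 1) = ((m + 1 : Nat) : Int) by push_cast; ring]
        rw [PySem.List.slice_natCast]
        rw [show m + 1 - (m - 3) = 4 by omega]
        rw [take_four_drop_map_range (pvD secret) (m - 3) k (by omega)]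
        unfold pvW
        simp only [show m - 3 + 1 = m - 2 by omega, show m - 3 + 2 = m - 1 by omega,
          show m - 3 + 3 = m by omega]
      have hp : PySem.List.pyGetD ((List.range (k+1)).map (pvP secret)) ((m : Int) + 1) 0
          = pvP secret (m + 1) := by
        rw [show ((m : Int) + 1) = ((m + 1 : Nat) : Int) by push_cast; ring]
        rw [PySem.List.pyGetD_natCast]
        rw [List.getD_eq_getElem?_getD]
        rw [List.getElem?_map, List.getElem?_range (by omega)]
        rfl
      rw [hw, hp]
    · have hnil : PySem.List.pyRange 3 ((m + 1 : Nat) : Int) 1 = [] := by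
        apply PySem.List.pyRange_one_eq_nil
        have : (m : Int) + 1 ≤ 3 := by exact_mod_cast (by omega : m + 1 ≤ 3)
        push_cast
        omega
      rw [hnil, href, if_neg h3, pvRef_le_three secret m (by omega)]
      rfl

-- ===== VERDICT (by name: the statement is the Claim_ definition above) =====
theorem price_timeline_spec : Claim_equal_price_timeline := by
  intro secret n _
  unfold Spec_price_timeline price_timeline price_timeline_alt
  rw [aloop, bloop1]
  simp only []
  rw [deltas_eq]
  have hlen : PySem.List.len ((List.range n.toNat).map (pvD secret)) = (n.toNat : Int) := by
    simp [PySem.List.len]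
  rw [hlen, bloop2 secret n.toNat n.toNat le_rfl]
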